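-- pv_equiv track=rewrite | github.com/muhammedshihab1001/MarketSentinel | app/core/auth/middleware.py | _get_feature_group
-- ===== SOURCE A (Python) =====
-- from typing import Optional
--
-- FEATURE_GROUP_MAP = {
--     "/snapshot": "snapshot",
--     "/predict/snapshot": "snapshot",
--     "/predict/live-snapshot": "snapshot",
--     "/portfolio": "portfolio",
--     "/drift": "drift",
--     "/performance": "performance",
--     "/agent/explain": "agent",
--     "/agent/political-risk": "agent",
--     "/equity": "signals",
--     "/model/feature-importance": "signals",
-- }
--
-- FREE_PATHS = {
--     "/health",
--     "/health/ready",
--     "/health/live",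
--     "/health/db",
--     "/health/model",
--     "/auth/me",
--     "/auth/owner-login",
--     "/auth/demo-login",
--     "/auth/logout",
--     "/universe",
--     "/model/info",
--     "/agent/agents",
--     "/metrics",
--     "/docs",
--     "/openapi.json",
--     "/redoc",
--     "/favicon.ico",
-- }
--
-- def _get_feature_group(path: str) -> Optional[str]:
--     if path in FREE_PATHS:
--         return None
--     for prefix, feature in FEATURE_GROUP_MAP.items():
--         if (
--             path == prefix
--             or path.startswith(prefix + "/")
--             or path.startswith(prefix + "?")
--         ):
--             return feature
--     return None
-- ===== SOURCE B (Python) =====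
-- from typing import Optional
--
-- FEATURE_GROUP_MAP = {
--     "/snapshot": "snapshot",
--     "/predict/snapshot": "snapshot",
--     "/predict/live-snapshot": "snapshot",
--     "/portfolio": "portfolio",
--     "/drift": "drift",
--     "/performance": "performance",
--     "/agent/explain": "agent",
--     "/agent/political-risk": "agent",
--     "/equity": "signals",
--     "/model/feature-importance": "signals",
-- }
--
-- FREE_PATHS = {
--     "/health",
--     "/health/ready",
--     "/health/live",
--     "/health/db",
--     "/health/model",
--     "/auth/me",
--     "/auth/owner-login",
--     "/auth/demo-login",
--     "/auth/logout",
--     "/universe",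
--     "/model/info",
--     "/agent/agents",
--     "/metrics",
--     "/docs",
--     "/openapi.json",
--     "/redoc",
--     "/favicon.ico",
-- }
--
-- def _get_feature_group(path):
--     # Walk the '/'-segment prefixes of the path (query string stripped) and
--     # look each one up directly in FEATURE_GROUP_MAP, instead of scanning the
--     # whole map with startswith tests.  Works because no map key is a prefix
--     # of another.
--     if path in FREE_PATHS:
--         return None
--     p, _, _ = path.partition('?')
--     prefix = ""
--     for ch in p:
--         if ch == '/':
--             feature = FEATURE_GROUP_MAP.get(prefix)
--             if feature is not None:
--                 return feature
--         prefix += ch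
--     return FEATURE_GROUP_MAP.get(p)
-- ===== Notes on version B (the rewrite author's own statement) =====
-- stated objective: alternative
-- what changed: Instead of scanning every FEATURE_GROUP_MAP entry with three startswith tests, B strips the query-string suffix from the path and walks the path's segment prefixes, doing one direct dict lookup per prefix (correct because no map key is a prefix of another).
import Mathlib
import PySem

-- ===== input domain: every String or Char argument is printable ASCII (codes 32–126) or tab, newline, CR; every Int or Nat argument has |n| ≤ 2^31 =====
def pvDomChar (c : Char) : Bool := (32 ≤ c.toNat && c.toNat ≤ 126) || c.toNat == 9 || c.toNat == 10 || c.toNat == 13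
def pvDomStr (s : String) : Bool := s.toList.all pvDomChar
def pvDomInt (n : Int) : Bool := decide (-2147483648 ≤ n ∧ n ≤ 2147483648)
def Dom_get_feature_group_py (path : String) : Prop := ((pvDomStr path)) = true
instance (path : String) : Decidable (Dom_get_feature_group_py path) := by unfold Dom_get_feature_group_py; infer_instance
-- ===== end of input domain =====

-- B replaces A's scan over all FEATURE_GROUP_MAP entries (three startswith tests each) by a walk
-- over the segment prefixes of the query-stripped path with a direct dict lookup per prefix
-- (objective: alternative decomposition; no speed claim).

-- ===== PORT A =====

def FEATURE_GROUP_MAP : PySem.Dict String String :=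
  PySem.Dict.ofList
    [("/snapshot", "snapshot"),
     ("/predict/snapshot", "snapshot"),
     ("/predict/live-snapshot", "snapshot"),
     ("/portfolio", "portfolio"),
     ("/drift", "drift"),
     ("/performance", "performance"),
     ("/agent/explain", "agent"),
     ("/agent/political-risk", "agent"),
     ("/equity", "signals"),
     ("/model/feature-importance", "signals")]

def FREE_PATHS : PySem.Set String :=
  PySem.Set.ofList
    ["/health", "/health/ready", "/health/live", "/health/db", "/health/model",
     "/auth/me", "/auth/owner-login", "/auth/demo-login", "/auth/logout",
     "/universe", "/model/info", "/agent/agents", "/metrics", "/docs",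
     "/openapi.json", "/redoc", "/favicon.ico"]

-- A's loop condition, verbatim
def condA (path pre : String) : Bool :=
  path == pre
    || PySem.Str.startswith path (pre ++ "/")
    || PySem.Str.startswith path (pre ++ "?")

-- 'for prefix, feature in FEATURE_GROUP_MAP.items(): if …: return feature'
def fgLoop (path : String) : List (String × String) → Option String
  | [] => none
  | (pre, feature) :: rest =>
      if condA path pre then some feature else fgLoop path rest

def get_feature_group_py (path : String) : Option String :=
  if PySem.Set.contains FREE_PATHS path then none
  else fgLoop path FEATURE_GROUP_MAP.items

-- ===== PORT B =====

-- 'prefix = ""; for ch in p: if ch == '/': … ; prefix += ch' — pre is the loop variable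
-- `prefix`, rest the characters of p still to visit (at the end pre = p, so the final
-- FEATURE_GROUP_MAP.get(p) is the lookup in the [] case).
def walkPrefixes (pre : List Char) : List Char → Option String
  | [] => PySem.Dict.get? FEATURE_GROUP_MAP (String.ofList pre)
  | c :: rest =>
      if c = '/' then
        match PySem.Dict.get? FEATURE_GROUP_MAP (String.ofList pre) with
        | some f => some f
        | none => walkPrefixes (pre ++ [c]) rest
      else walkPrefixes (pre ++ [c]) rest

def get_feature_group_py_alt (path : String) : Option String :=
  if PySem.Set.contains FREE_PATHS path then none
  else
    -- p, _, _ = path.partition('?') : p is exactly the characters before the first '?'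
    walkPrefixes [] (path.toList.takeWhile (fun c => c ≠ '?'))

-- ===== PRECONDITION & SPEC =====
def Spec_get_feature_group_py (path : String) (out : Option String) : Prop := out = get_feature_group_py_alt path
instance (path : String) (out : Option String) : Decidable (Spec_get_feature_group_py path out) := by unfold Spec_get_feature_group_py; infer_instance

-- ===== CLAIM (what is proved, stated in full; the proofs are below) =====
def Claim_equal_get_feature_group_py : Prop := ∀ (path : String), Dom_get_feature_group_py path → Spec_get_feature_group_py path (get_feature_group_py path)

-- ===== LEMMAS AND PROOFS =====

-- the items of the dict literal, as a plain list
def fgItems : List (String × String) :=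
    [("/snapshot", "snapshot"),
     ("/predict/snapshot", "snapshot"),
     ("/predict/live-snapshot", "snapshot"),
     ("/portfolio", "portfolio"),
     ("/drift", "drift"),
     ("/performance", "performance"),
     ("/agent/explain", "agent"),
     ("/agent/political-risk", "agent"),
     ("/equity", "signals"),
     ("/model/feature-importance", "signals")]

lemma items_def : FEATURE_GROUP_MAP.items = fgItems := rfl

lemma toList_injective {s t : String} (h : s.toList = t.toList) : s = t := by
  rw [← String.ofList_toList (s := s), ← String.ofList_toList (s := t), h]

-- no key of the map contains '?'
lemma noQ : ∀ pr ∈ fgItems, '?' ∉ pr.1.toList := by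
  intro pr h
  fin_cases h <;> simp

-- no key of the map is a (char-list) prefix of the key of a different entry
lemma nonpre : ∀ p1 ∈ fgItems, ∀ p2 ∈ fgItems, p1.1.toList <+: p2.1.toList → p1 = p2 := by
  intro p1 h1 p2 h2
  fin_cases h1 <;> fin_cases h2 <;> simp [List.cons_prefix_cons]

-- c is one of the '/'-segment prefixes of p that B looks up
def CandP (p c : List Char) : Prop := c = p ∨ c ++ ['/'] <+: p

lemma cand_prefix {p c : List Char} (h : CandP p c) : c <+: p := by
  rcases h with rfl | h
  · exact List.prefix_refl _
  · exact (List.prefix_append c ['/']).trans h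

lemma cand_comparable {p c1 c2 : List Char} (h1 : CandP p c1) (h2 : CandP p c2) :
    c1 <+: c2 ∨ c2 <+: c1 :=
  List.prefix_or_prefix_of_prefix (cand_prefix h1) (cand_prefix h2)

lemma prefix_step {pre k : List Char} {c : Char} {r : List Char}
    (h1 : pre <+: k) (h2 : k <+: pre ++ c :: r) (h3 : k ≠ pre) : pre ++ [c] <+: k := by
  obtain ⟨a, rfl⟩ := h1
  rw [List.prefix_append_right_inj] at h2
  cases a with
  | nil => exact absurd (by simp) h3
  | cons d a' =>
      rw [List.cons_prefix_cons] at h2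
      obtain ⟨rfl, -⟩ := h2
      rw [List.prefix_append_right_inj]
      exact ⟨a', rfl⟩

lemma takeWhile_case (p : Char → Bool) (l : List Char) :
    l = l.takeWhile p ∨ ∃ d r, p d = false ∧ l = l.takeWhile p ++ d :: r := by
  have h := (List.takeWhile_append_dropWhile (p := p) (l := l)).symm
  cases hd : l.dropWhile p with
  | nil => left; rw [hd, List.append_nil] at h; exact h
  | cons d r =>
      right
      refine ⟨d, r, ?_, by rw [hd] at h; exact h⟩
      have hlen : 0 < (l.dropWhile p).length := by rw [hd]; simp
      have := List.dropWhile_get_zero_not (p := p) l hlen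
      simpa [hd] using this

-- A's match condition on a key without '?' says exactly that the key is one of B's candidates
lemma match_iff (cs ks : List Char) (hq : '?' ∉ ks) :
    (cs = ks ∨ ks ++ ['/'] <+: cs ∨ ks ++ ['?'] <+: cs) ↔
      CandP (cs.takeWhile (fun c => c ≠ '?')) ks := by
  have hks : ks.takeWhile (fun c => (c ≠ '?' : Bool)) = ks := by
    rw [List.takeWhile_eq_self_iff]
    intro x hx
    simp only [decide_eq_true_eq]
    exact fun h => hq (h ▸ hx)
  constructor
  · rintro (rfl | ⟨t, ht⟩ | ⟨t, ht⟩)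
    · exact Or.inl hks.symm
    · right
      have hks' : (ks ++ ['/']).takeWhile (fun c => (c ≠ '?' : Bool)) = ks ++ ['/'] := by
        rw [List.takeWhile_eq_self_iff]
        intro x hx
        simp only [decide_eq_true_eq]
        rcases List.mem_append.1 hx with hx | hx
        · exact fun h => hq (h ▸ hx)
        · simp at hx; subst hx; simp
      subst ht
      rw [List.takeWhile_append, hks', if_pos rfl]
      exact ⟨(t.takeWhile (fun c => (c ≠ '?' : Bool))), rfl⟩
    · left
      subst ht
      rw [List.append_assoc, List.takeWhile_append, hks]
      simp
  · rintro (h | ⟨t, ht⟩)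
    · rcases takeWhile_case (fun c => (c ≠ '?' : Bool)) cs with hcs | ⟨d, r, hd, hcs⟩
      · left; rw [hcs, ← h]
      · right; right
        have hd' : d = '?' := by simpa using hd
        subst hd'
        refine ⟨r, ?_⟩
        rw [← h] at hcs
        simpa using hcs.symm
    · right; left
      have : ks ++ ['/'] <+: cs.takeWhile (fun c => (c ≠ '?' : Bool)) := ⟨t, ht⟩
      exact this.trans (List.takeWhile_prefix _)

-- generic assoc-list lookup lemmas for PySem.Dict over String keys
lemma get?_mem (l : List (String × String)) (k f : String)
    (h : (PySem.Dict.mk l).get? k = some f) : (k, f) ∈ l := by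
  induction l with
  | nil => simp [PySem.Dict.get?] at h
  | cons hd tl ih =>
      obtain ⟨k0, v0⟩ := hd
      rw [PySem.Dict.get?_mk_cons] at h
      by_cases hk : (k0 == k) = true
      · rw [if_pos hk] at h
        obtain rfl : v0 = f := by injection h
        obtain rfl : k0 = k := eq_of_beq hk
        exact List.mem_cons_self
      · rw [if_neg hk] at h
        exact List.mem_cons_of_mem _ (ih h)

lemma mem_get? (l : List (String × String)) (k f : String)
    (hmem : (k, f) ∈ l) (huniq : ∀ pr ∈ l, pr.1 = k → pr.2 = f) :
    (PySem.Dict.mk l).get? k = some f := by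
  induction l with
  | nil => simp at hmem
  | cons hd tl ih =>
      obtain ⟨k0, v0⟩ := hd
      rw [PySem.Dict.get?_mk_cons]
      by_cases hk : (k0 == k) = true
      · rw [if_pos hk]
        have : v0 = f := huniq (k0, v0) List.mem_cons_self (eq_of_beq hk)
        rw [this]
      · rw [if_neg hk]
        have hk' : k0 ≠ k := fun h => hk (beq_iff_eq.2 h)
        have : (k, f) ∈ tl := by
          rcases List.mem_cons.1 hmem with h | h
          · exact absurd (congrArg Prod.fst h).symm hk'
          · exact h
        exact ih this (fun pr hpr => huniq pr (List.mem_cons_of_mem _ hpr))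

-- A's loop condition, in char-list form
lemma condA_iff (path pre : String) :
    condA path pre = true ↔
      (path.toList = pre.toList ∨ pre.toList ++ ['/'] <+: path.toList ∨
        pre.toList ++ ['?'] <+: path.toList) := by
  have h1 : (pre ++ "/").toList = pre.toList ++ ['/'] := by
    rw [String.toList_append]; rfl
  have h2 : (pre ++ "?").toList = pre.toList ++ ['?'] := by
    rw [String.toList_append]; rfl
  constructor
  · intro h
    simp only [condA, Bool.or_eq_true, beq_iff_eq, PySem.Str.startswith_eq] at h
    rcases h with (h | h) | h
    · exact Or.inl (by rw [h])
    · rw [PySem.Chars.startswith_iff, h1] at h; exact Or.inr (Or.inl h)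
    · rw [PySem.Chars.startswith_iff, h2] at h; exact Or.inr (Or.inr h)
  · intro h
    simp only [condA, Bool.or_eq_true, beq_iff_eq, PySem.Str.startswith_eq]
    rcases h with h | h | h
    · exact Or.inl (Or.inl (toList_injective h))
    · exact Or.inl (Or.inr (by rw [PySem.Chars.startswith_iff, h1]; exact h))
    · exact Or.inr (by rw [PySem.Chars.startswith_iff, h2]; exact h)

lemma loop_none (path : String) :
    ∀ l : List (String × String), (∀ pr ∈ l, condA path pr.1 = false) → fgLoop path l = none := by
  intro l
  induction l with
  | nil => intro _; rfl
  | cons hd tl ih =>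
      obtain ⟨k0, v0⟩ := hd
      intro h
      have hh : condA path k0 = false := h (k0, v0) List.mem_cons_self
      simp only [fgLoop, hh]
      simp only [Bool.false_eq_true, if_false]
      exact ih (fun pr hpr => h pr (List.mem_cons_of_mem _ hpr))

lemma loop_some (path : String) (k f : String) :
    ∀ l : List (String × String), (k, f) ∈ l → condA path k = true →
      (∀ pr ∈ l, condA path pr.1 = true → pr = (k, f)) → fgLoop path l = some f := by
  intro l
  induction l with
  | nil => intro h; simp at h
  | cons hd tl ih =>
      obtain ⟨k0, v0⟩ := hd
      intro hmem hc huniq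
      by_cases h0 : condA path k0 = true
      · have heq : (k0, v0) = (k, f) := huniq (k0, v0) List.mem_cons_self h0
        injection heq with heq1 heq2
        simp [fgLoop, h0, heq2]
      · simp only [fgLoop, h0]
        have hmem' : (k, f) ∈ tl := by
          rcases List.mem_cons.1 hmem with h | h
          · injection h with h1 h2
            exact absurd (h1 ▸ hc) h0
          · exact h
        exact ih hmem' hc (fun pr hpr => huniq pr (List.mem_cons_of_mem _ hpr))

-- the candidates walkPrefixes still visits from state (pre, rest)
def Vis (pre rest c : List Char) : Prop := pre <+: c ∧ CandP (pre ++ rest) c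

lemma vis_weaken_slash {pre r c : List Char} (h : Vis (pre ++ ['/']) r c) : Vis pre ('/' :: r) c := by
  obtain ⟨h1, h2⟩ := h
  exact ⟨(List.prefix_append pre ['/']).trans h1, by simpa using h2⟩

lemma vis_weaken {pre r c : List Char} {d : Char} (h : Vis (pre ++ [d]) r c) : Vis pre (d :: r) c := by
  obtain ⟨h1, h2⟩ := h
  exact ⟨(List.prefix_append pre [d]).trans h1, by simpa using h2⟩

lemma vis_self_slash (pre r : List Char) : Vis pre ('/' :: r) pre :=
  ⟨List.prefix_refl _, Or.inr (by simp)⟩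

lemma vis_strengthen {pre r c : List Char} {d : Char} (h : Vis pre (d :: r) c) (hne : c ≠ pre) :
    Vis (pre ++ [d]) r c := by
  obtain ⟨h1, h2⟩ := h
  have hc : c <+: pre ++ d :: r := cand_prefix h2
  have := prefix_step h1 hc hne
  exact ⟨this, by simpa using h2⟩

lemma walk_none : ∀ (rest pre : List Char),
    (∀ c, Vis pre rest c → PySem.Dict.get? FEATURE_GROUP_MAP (String.ofList c) = none) →
    walkPrefixes pre rest = none := by
  intro rest
  induction rest with
  | nil =>
      intro pre h
      exact h pre ⟨List.prefix_refl _, Or.inl (by simp)⟩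
  | cons d r ih =>
      intro pre h
      by_cases hd : d = '/'
      · subst hd
        have h0 : PySem.Dict.get? FEATURE_GROUP_MAP (String.ofList pre) = none :=
          h pre (vis_self_slash pre r)
        simp only [walkPrefixes, h0]
        exact ih (pre ++ ['/']) (fun c hc => h c (vis_weaken_slash hc))
      · simp only [walkPrefixes, if_neg hd]
        exact ih (pre ++ [d]) (fun c hc => h c (vis_weaken hc))

lemma walk_some : ∀ (rest pre k : List Char) (f : String),
    Vis pre rest k →
    PySem.Dict.get? FEATURE_GROUP_MAP (String.ofList k) = some f →
    (∀ c, Vis pre rest c → PySem.Dict.get? FEATURE_GROUP_MAP (String.ofList c) ≠ none → c = k) →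
    walkPrefixes pre rest = some f := by
  intro rest
  induction rest with
  | nil =>
      intro pre k f hvis hget huniq
      obtain ⟨h1, h2⟩ := hvis
      have hk : k = pre := by
        rcases h2 with h | h
        · simpa using h
        · exfalso
          have hl1 := h.length_le
          have hl2 := h1.length_le
          simp only [List.length_append, List.length_singleton, List.append_nil] at hl1 hl2
          omega
      subst hk
      simpa [walkPrefixes] using hget
  | cons d r ih =>
      intro pre k f hvis hget huniq
      by_cases hd : d = '/'
      · subst hd
        cases h0 : PySem.Dict.get? FEATURE_GROUP_MAP (String.ofList pre) with
        | some v =>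
            have hpk : pre = k := huniq pre (vis_self_slash pre r) (by rw [h0]; exact fun h => by cases h)
            subst hpk
            rw [hget] at h0
            injection h0 with h0
            subst h0
            simp [walkPrefixes, hget]
        | none =>
            have hkp : k ≠ pre := by
              intro h; rw [h] at hget; rw [hget] at h0; cases h0
            simp [walkPrefixes, h0]
            exact ih (pre ++ ['/']) k f (vis_strengthen hvis hkp) hget
              (fun c hc => huniq c (vis_weaken_slash hc))
      · have hkp : k ≠ pre := by
          intro h
          subst h
          rcases hvis.2 with h | h
          · have := congrArg List.length h; simp at this
          · rcases h with ⟨t, ht⟩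
            rw [List.append_assoc] at ht
            have := List.append_cancel_left ht
            injection this with h1 h2
            exact hd h1.symm
        simp only [walkPrefixes, if_neg hd]
        exact ih (pre ++ [d]) k f (vis_strengthen hvis hkp) hget
          (fun c hc => huniq c (vis_weaken hc))

-- main: the two scans agree on every path
lemma loop_eq_walk (path : String) :
    fgLoop path FEATURE_GROUP_MAP.items =
      walkPrefixes [] (path.toList.takeWhile (fun c => c ≠ '?')) := by
  have heta : FEATURE_GROUP_MAP = PySem.Dict.mk FEATURE_GROUP_MAP.items := rfl
  by_cases hm : ∃ pr ∈ FEATURE_GROUP_MAP.items, condA path pr.1 = true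
  · obtain ⟨⟨k, f⟩, hin, hc⟩ := hm
    have huniq : ∀ pr ∈ FEATURE_GROUP_MAP.items, condA path pr.1 = true → pr = (k, f) := by
      intro pr hpr hcpr
      have hk := (match_iff path.toList k.toList (noQ _ (items_def ▸ hin))).1 ((condA_iff path k).1 hc)
      have hpr' := (match_iff path.toList pr.1.toList (noQ _ (items_def ▸ hpr))).1
        ((condA_iff path pr.1).1 hcpr)
      rcases cand_comparable hpr' hk with h | h
      · exact nonpre pr (items_def ▸ hpr) (k, f) (items_def ▸ hin) h
      · exact (nonpre (k, f) (items_def ▸ hin) pr (items_def ▸ hpr) h).symm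
    rw [loop_some path k f _ hin hc huniq]
    have hkq : '?' ∉ k.toList := noQ _ (items_def ▸ hin)
    have hcand : CandP (path.toList.takeWhile (fun c => c ≠ '?')) k.toList :=
      (match_iff path.toList k.toList hkq).1 ((condA_iff path k).1 hc)
    refine (walk_some _ [] k.toList f ⟨List.nil_prefix, by simpa using hcand⟩ ?_ ?_).symm
    · rw [String.ofList_toList]
      refine heta ▸ mem_get? _ k f hin ?_
      intro pr hpr hpr1
      have : condA path pr.1 = true := by rw [hpr1]; exact hc
      exact congrArg Prod.snd (huniq pr hpr this)
    · intro c hvc hne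
      cases hgc : PySem.Dict.get? FEATURE_GROUP_MAP (String.ofList c) with
      | none => exact absurd hgc hne
      | some f0 =>
          have hmem : (String.ofList c, f0) ∈ FEATURE_GROUP_MAP.items := get?_mem _ _ _ (heta ▸ hgc)
          have hq : '?' ∉ (String.ofList c).toList := noQ _ (items_def ▸ hmem)
          have hcand' : CandP (path.toList.takeWhile (fun c => c ≠ '?')) (String.ofList c).toList := by
            rw [String.toList_ofList]
            simpa using hvc.2
          have hcond : condA path (String.ofList c) = true :=
            (condA_iff path (String.ofList c)).2 ((match_iff path.toList (String.ofList c).toList hq).2 hcand')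
          have := huniq (String.ofList c, f0) hmem hcond
          have : String.ofList c = k := congrArg Prod.fst this
          rw [← this, String.toList_ofList]
  · push Not at hm
    have hm' : ∀ pr ∈ FEATURE_GROUP_MAP.items, condA path pr.1 = false := by
      intro pr hpr
      exact Bool.eq_false_iff.2 (fun h => (by simpa using hm pr hpr h))
    rw [loop_none path _ hm']
    refine (walk_none _ [] ?_).symm
    intro c hvc
    cases hgc : PySem.Dict.get? FEATURE_GROUP_MAP (String.ofList c) with
    | none => rfl
    | some f0 =>
        exfalso
        have hmem : (String.ofList c, f0) ∈ FEATURE_GROUP_MAP.items := get?_mem _ _ _ (heta ▸ hgc)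
        have hq : '?' ∉ (String.ofList c).toList := noQ _ (items_def ▸ hmem)
        have hcand' : CandP (path.toList.takeWhile (fun c => c ≠ '?')) (String.ofList c).toList := by
          rw [String.toList_ofList]
          simpa using hvc.2
        have hcond : condA path (String.ofList c) = true :=
          (condA_iff path (String.ofList c)).2 ((match_iff path.toList (String.ofList c).toList hq).2 hcand')
        have := hm' (String.ofList c, f0) hmem
        rw [hcond] at this
        cases this

-- ===== VERDICT (by name: the statement is the Claim_ definition above) =====
theorem get_feature_group_py_spec : Claim_equal_get_feature_group_py := by
  intro path _
  unfold Spec_get_feature_group_py get_feature_group_py get_feature_group_py_alt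
  by_cases hf : path ∈ FREE_PATHS
  · simp [hf]
  · simp only [PySem.Set.contains_iff, hf, if_false]
    exact loop_eq_walk path
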